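-- pv_equiv track=rewrite | github.com/Amila-Rukshan/sihnala-song-lyrics-corpus-ananmanan.lk | scrapeLyrics.py | findSongSinger
-- ===== SOURCE A (Python) =====
-- def findSongSinger(song_name_singer):
--     song_name_singer = song_name_singer.split(' ')
--     del song_name_singer[0] # remove numbering
--     del song_name_singer[-1] # remove date
--
--     singer = ""
--     song = ""
--     a =True
--     for chunk in song_name_singer:
--         if chunk=="-":
--             a = False
--             continue
--         if a:
--             singer += (chunk+" ")
--         else:
--             song += (chunk+" ")
--
--     return song, singer
-- ===== SOURCE B (Python) =====
-- def findSongSinger(song_name_singer):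
--     parts = song_name_singer.split(' ')
--     del parts[0]  # remove numbering
--     del parts[-1]  # remove date
--     if '-' in parts:
--         i = parts.index('-')
--         singer_parts = parts[:i]
--         song_parts = [c for c in parts[i + 1:] if c != '-']
--     else:
--         singer_parts = parts
--         song_parts = []
--     song = ''.join(c + ' ' for c in song_parts)
--     singer = ''.join(c + ' ' for c in singer_parts)
--     return song, singer
-- ===== Notes on version B (the rewrite author's own statement) =====
-- stated objective: simpler
-- what changed: Replaces the flag-driven accumulator loop with locating the first '-' via parts.index, slicing the singer side before it and filtering further '-' tokens from the song side, then joining each side once.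
import Mathlib
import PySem

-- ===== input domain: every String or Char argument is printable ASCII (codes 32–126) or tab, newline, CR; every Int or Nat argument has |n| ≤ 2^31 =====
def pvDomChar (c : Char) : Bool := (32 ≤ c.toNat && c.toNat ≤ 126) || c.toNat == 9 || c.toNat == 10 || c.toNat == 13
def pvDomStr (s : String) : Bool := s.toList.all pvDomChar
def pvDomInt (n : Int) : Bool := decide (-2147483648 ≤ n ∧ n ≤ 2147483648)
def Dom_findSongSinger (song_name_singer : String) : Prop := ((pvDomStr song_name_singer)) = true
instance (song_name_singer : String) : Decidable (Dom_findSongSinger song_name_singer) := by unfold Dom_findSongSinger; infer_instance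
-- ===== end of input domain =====

-- B keeps A's tokenisation and the two deletions but replaces the flag loop by
-- locating the first '-' and joining each side once (objective: simpler).

-- ===== PORT A =====
-- loop body: state (singer, song, a)
def pvStepA (st : List Char × List Char × Bool) (chunk : List Char) : List Char × List Char × Bool :=
  if chunk = ['-'] then (st.1, st.2.1, false)
  else if st.2.2 then (st.1 ++ chunk ++ [' '], st.2.1, st.2.2)
  else (st.1, st.2.1 ++ chunk ++ [' '], st.2.2)

def findSongSinger (song_name_singer : String) : String × String :=
  let parts0 := PySem.Chars.splitOn song_name_singer.toList [' ']
  let parts1 := parts0.tail          -- del [0] (split is never empty)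
  let parts2 := parts1.dropLast      -- del [-1]; raises IndexError iff parts1 = [] — excluded by Pre_
  let st := parts2.foldl pvStepA ([], [], true)
  (String.ofList st.2.1, String.ofList st.1)

-- ===== PORT B =====
def findSongSinger_alt (song_name_singer : String) : String × String :=
  let parts := ((PySem.Chars.splitOn song_name_singer.toList [' ']).tail).dropLast
  let sides : List (List Char) × List (List Char) :=
    match PySem.List.index? parts ['-'] with   -- '-' in parts / parts.index('-')
    | some i => (parts.take i, (parts.drop (i + 1)).filter (fun c => c ≠ ['-']))
    | none => (parts, [])
  (String.ofList (PySem.Chars.join [] (sides.2.map (fun c => c ++ [' ']))),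
   String.ofList (PySem.Chars.join [] (sides.1.map (fun c => c ++ [' ']))))

-- ===== PRECONDITION & SPEC =====
-- Pre_ excludes strings with no space: there A's `del song_name_singer[-1]` raises IndexError.
def Pre_findSongSinger (song_name_singer : String) : Prop := ' ' ∈ song_name_singer.toList
instance (song_name_singer : String) : Decidable (Pre_findSongSinger song_name_singer) := by
  unfold Pre_findSongSinger; infer_instance

def pvWitness_findSongSinger : String := "1 ab cd - ef 2024"

def Spec_findSongSinger (song_name_singer : String) (out : String × String) : Prop := out = findSongSinger_alt song_name_singer
instance (song_name_singer : String) (out : String × String) : Decidable (Spec_findSongSinger song_name_singer out) := by unfold Spec_findSongSinger; infer_instance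

-- ===== CLAIM (what is proved, stated in full; the proofs are below) =====
def Claim_equal_findSongSinger : Prop := ∀ (song_name_singer : String), Dom_findSongSinger song_name_singer → Pre_findSongSinger song_name_singer → Spec_findSongSinger song_name_singer (findSongSinger song_name_singer)

-- ===== LEMMAS AND PROOFS =====

-- join each side once, as B does
def pvJ (xs : List (List Char)) : List Char :=
  PySem.Chars.join [] (xs.map (fun c => c ++ [' ']))

theorem pvJ_nil : pvJ [] = [] := rfl

theorem pvJ_cons (c : List Char) (xs : List (List Char)) :
    pvJ (c :: xs) = c ++ [' '] ++ pvJ xs := by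
  cases xs with
  | nil => simp [pvJ, PySem.Chars.join, List.intercalate]
  | cons d ds => simp [pvJ, PySem.Chars.join, List.intercalate]

-- once the flag is false, only song grows, by every non-"-" chunk
theorem foldl_stepA_false (parts : List (List Char)) (sg so : List Char) :
    parts.foldl pvStepA (sg, so, false)
      = (sg, so ++ pvJ (parts.filter (fun c => c ≠ ['-'])), false) := by
  induction parts generalizing so with
  | nil => simp [pvJ_nil]
  | cons c rest ih =>
    by_cases hc : c = ['-']
    · simp [pvStepA, hc, ih]
    · simp [pvStepA, hc, ih, pvJ_cons]

-- while the flag is true, the loop is governed by the first "-"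
theorem foldl_stepA_true (parts : List (List Char)) (sg so : List Char) :
    parts.foldl pvStepA (sg, so, true)
      = match PySem.List.index? parts ['-'] with
        | some i => (sg ++ pvJ (parts.take i),
                     so ++ pvJ ((parts.drop (i + 1)).filter (fun c => c ≠ ['-'])), false)
        | none => (sg ++ pvJ parts, so, true) := by
  induction parts generalizing sg with
  | nil => simp [pvJ_nil]
  | cons c rest ih =>
    by_cases hc : c = ['-']
    · subst hc
      rw [PySem.List.index?_cons_self]
      simp [pvStepA, foldl_stepA_false, pvJ_nil]
    · rw [PySem.List.index?_cons_of_ne rest hc]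
      have : (c :: rest).foldl pvStepA (sg, so, true)
          = rest.foldl pvStepA (sg ++ c ++ [' '], so, true) := by
        simp [pvStepA, hc]
      rw [this, ih]
      cases hidx : PySem.List.index? rest ['-'] with
      | none => simp [pvJ_cons]
      | some i => simp [pvJ_cons, List.take_succ_cons, List.drop_succ_cons]

-- ===== VERDICT (by name: the statement is the Claim_ definition above) =====
theorem findSongSinger_spec : Claim_equal_findSongSinger := by
  intro s _ _
  unfold Spec_findSongSinger findSongSinger findSongSinger_alt
  simp only
  rw [foldl_stepA_true]
  cases hidx : PySem.List.index?
      ((PySem.Chars.splitOn s.toList [' ']).tail).dropLast ['-'] with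
  | none => simp [pvJ]
  | some i => simp [pvJ]
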